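-- pv_equiv track=rewrite | github.com/HeyBoardgame/recommender | src/services/recommender.py | get_recommendable_by_count
-- ===== SOURCE A (Python) =====
-- from collections import defaultdict
--
-- def count_recommended_ids_per_member(group_recommendable: list[list]):
--     recommendation_count_dict = defaultdict(int)
--     for recommendable in group_recommendable:
--         for bg_id in recommendable:
--             recommendation_count_dict[bg_id] += 1
--     return recommendation_count_dict
--
-- def get_recommendable_by_count(recommendable_ids: list[list]):
--     recommendable_by_count_dict = defaultdict(list)
--     recommendation_count_dict = count_recommended_ids_per_member(recommendable_ids)
--
--     for bg_id, count in recommendation_count_dict.items():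
--         recommendable_by_count_dict[count].append(bg_id)
--     recommendable_by_count_dict = dict(sorted(
--         recommendable_by_count_dict.items(),
--         key=lambda item: item[0],
--         reverse=True
--     ))
--
--     return recommendable_by_count_dict
-- ===== SOURCE B (Python) =====
-- def get_recommendable_by_count(recommendable_ids: list[list]):
--     counts = {}
--     for bg_id in (x for row in recommendable_ids for x in row):
--         counts[bg_id] = counts.get(bg_id, 0) + 1
--     return {
--         c: [bg_id for bg_id, n in counts.items() if n == c]
--         for c in sorted(set(counts.values()), reverse=True)
--     }
-- ===== Notes on version B (the rewrite author's own statement) =====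
-- stated objective: alternative
-- what changed: B replaces A's bucket-dict-then-sort-the-dict-items with: count once, sort the distinct counts descending, and build each group by filtering the counter's items for that count.
import Mathlib
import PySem

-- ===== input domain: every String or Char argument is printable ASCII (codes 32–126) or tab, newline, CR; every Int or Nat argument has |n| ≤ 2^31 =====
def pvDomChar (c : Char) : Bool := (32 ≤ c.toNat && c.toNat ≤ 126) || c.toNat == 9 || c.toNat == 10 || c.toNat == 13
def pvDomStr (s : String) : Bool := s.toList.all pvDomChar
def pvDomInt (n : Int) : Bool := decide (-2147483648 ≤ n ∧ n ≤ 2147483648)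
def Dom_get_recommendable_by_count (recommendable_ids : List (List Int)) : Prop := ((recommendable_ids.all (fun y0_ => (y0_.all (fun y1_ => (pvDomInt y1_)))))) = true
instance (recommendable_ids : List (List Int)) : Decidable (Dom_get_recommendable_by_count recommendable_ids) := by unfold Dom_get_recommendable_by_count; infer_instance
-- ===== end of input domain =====

-- B replaces A's bucket-dict-then-sort with: count, sort the distinct counts descending, filter per count (alternative decomposition, same behaviour).

-- ===== PORT A =====
def count_recommended_ids_per_member (group_recommendable : List (List Int)) : PySem.Dict Int Int :=
  group_recommendable.foldl
    (fun d recommendable => recommendable.foldl (fun d bg_id => d.modify bg_id 0 (· + 1)) d)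
    PySem.Dict.empty

def get_recommendable_by_count (recommendable_ids : List (List Int)) : List (Int × List Int) :=
  let cnt := count_recommended_ids_per_member recommendable_ids
  let bucket := cnt.items.foldl (fun d p => d.modify p.2 [] (· ++ [p.1])) PySem.Dict.empty
  (PySem.Dict.ofList (PySem.List.sorted bucket.items (fun item => item.1) true)).items

-- ===== PORT B =====
def get_recommendable_by_count_alt (recommendable_ids : List (List Int)) : List (Int × List Int) :=
  let counts := (recommendable_ids.flatMap (fun row => row)).foldl
      (fun d x => d.insert x (d.getD x 0 + 1)) PySem.Dict.empty
  (PySem.List.sorted (PySem.Set.ofList counts.values) (fun c => c) true).map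
    (fun c => (c, (counts.items.filter (fun p => p.2 == c)).map (fun p => p.1)))

-- ===== PRECONDITION & SPEC =====
def Spec_get_recommendable_by_count (recommendable_ids : List (List Int)) (out : List (Int × List Int)) : Prop := out = get_recommendable_by_count_alt recommendable_ids
instance (recommendable_ids : List (List Int)) (out : List (Int × List Int)) : Decidable (Spec_get_recommendable_by_count recommendable_ids out) := by unfold Spec_get_recommendable_by_count; infer_instance

-- ===== CLAIM (what is proved, stated in full; the proofs are below) =====
def Claim_equal_get_recommendable_by_count : Prop := ∀ (recommendable_ids : List (List Int)), Dom_get_recommendable_by_count recommendable_ids → Spec_get_recommendable_by_count recommendable_ids (get_recommendable_by_count recommendable_ids)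

-- ===== LEMMAS AND PROOFS =====

theorem count_eq_counter (rows : List (List Int)) :
    count_recommended_ids_per_member rows = PySem.Dict.counter (rows.flatMap (fun r => r)) := by
  rw [PySem.Dict.counter_eq_foldl, show rows.flatMap (fun r => r) = rows.flatten by simp,
    List.foldl_flatten]
  rfl

theorem main_eq (rows : List (List Int)) :
    get_recommendable_by_count rows = get_recommendable_by_count_alt rows := by
  unfold get_recommendable_by_count get_recommendable_by_count_alt
  dsimp only
  rw [count_eq_counter, PySem.Dict.foldl_insert_getD_add_one_eq_counter]
  set cnt := PySem.Dict.counter (rows.flatMap (fun r => r)) with hcnt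
  set items := cnt.items with hitems
  set bucket := items.foldl (fun d p => d.modify p.2 [] (· ++ [p.1])) PySem.Dict.empty with hbucket
  set g : Int → Int × List Int :=
    fun c => (c, (items.filter (fun p => p.2 == c)).map (fun p => p.1)) with hg
  -- bucket keys
  have hk : bucket.keys = PySem.Set.ofList (items.map (fun p => p.2)) := by
    rw [hbucket]
    exact PySem.Dict.keys_foldl_modify_key items (fun p => p.2) []
      (fun _ p => (· ++ [p.1])) PySem.Dict.empty
  have hknd : bucket.keys.Nodup := by
    rw [hbucket]
    exact PySem.Dict.nodup_keys_foldl_modify_key items (fun p => p.2) []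
      (fun _ p => (· ++ [p.1])) PySem.Dict.empty (by simp [PySem.Dict.keys_empty])
  -- bucket values
  have hget : ∀ c : Int, bucket.getD c [] = (items.filter (fun p => p.2 == c)).map (fun p => p.1) := by
    intro c
    have hswap : bucket = (items.map Prod.swap).foldl
        (fun d p => d.modify p.1 [] (· ++ [p.2])) PySem.Dict.empty := by
      rw [List.foldl_map]; rfl
    rw [hswap, PySem.Dict.getD_foldl_modify_append]
    simp [List.filter_map, List.map_map, Function.comp_def, Prod.swap]
  -- bucket items
  have hbi : bucket.items = bucket.keys.map g := by
    rw [PySem.Dict.items_eq_map_keys bucket hknd []]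
    exact List.map_congr_left (fun c _ => by rw [hg]; simp [hget c])
  -- values of cnt
  have hvals : PySem.Set.ofList cnt.values = bucket.keys := by
    rw [hk]; rfl
  rw [hvals]
  set cs := PySem.List.sorted bucket.keys (fun c => c) true with hcs
  have hcsnd : cs.Nodup := by
    have := (PySem.List.sorted_perm bucket.keys (fun c => c) true).symm
    exact this.nodup hknd
  have hpair : List.Pairwise (fun a b : Int × List Int => b.1 < a.1) (cs.map g) := by
    rw [List.pairwise_map]
    have h1 : List.Pairwise (fun a b : Int => b ≤ a) cs :=
      PySem.List.sorted_pairwise_rev bucket.keys (fun c => c)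
    exact (h1.and hcsnd).imp (fun {a b} h => by
      have : b < a := lt_of_le_of_ne h.1 (Ne.symm h.2)
      simpa [hg] using this)
  have hperm : (cs.map g).Perm bucket.items := by
    rw [hbi]
    exact (PySem.List.sorted_perm bucket.keys (fun c => c) true).map g
  have hsorted : PySem.List.sorted bucket.items (fun item => item.1) true = cs.map g :=
    PySem.List.sorted_rev_eq_of_perm_of_pairwise_gt bucket.items (cs.map g) (fun item => item.1)
      hperm hpair
  rw [hsorted]
  -- dict(...) of a nodup-key pair list is that list
  have hmapfst : (cs.map g).map (fun p => p.1) = cs := by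
    simp [hg, List.map_map, Function.comp_def]
  have : (PySem.Dict.ofList (cs.map g)).items = cs.map g := by
    show ((cs.map g).foldl (fun d p => d.insert p.1 p.2) PySem.Dict.empty).items = cs.map g
    rw [PySem.Dict.items_foldl_insert_fresh (cs.map g) (fun p => p.1) (fun p => p.2)
      PySem.Dict.empty (fun a _ => PySem.Dict.contains_empty _) (by rw [hmapfst]; exact hcsnd)]
    simp [Function.comp_def]
    rfl
  rw [this]

-- ===== VERDICT (by name: the statement is the Claim_ definition above) =====
theorem get_recommendable_by_count_spec : Claim_equal_get_recommendable_by_count := by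
  intro rows _
  unfold Spec_get_recommendable_by_count
  exact main_eq rows
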